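-- pv_equiv track=rewrite | github.com/thebjko/algorithm | scratch/truck_01.py | solution
-- ===== SOURCE A (Python) =====
-- def solution(bridge_length, weight, truck_weights):
--     time_lapse = 1
--     offset = 0
--     n_trucks = len(truck_weights)
--     for i in range(n_trucks):
--         i += offset
--         if i >= n_trucks:
--             break
--         for j in range(min(bridge_length, n_trucks-i), 0, -1):
--             s, l = sum(truck_weights[i:i+j]), len(truck_weights[i:i+j])
--             if s <= weight and l <= bridge_length:
--                 time_lapse += bridge_length + l - 1   # 4가 다 지나가기 전에 3이 올라온다.
--                 offset += j - 1
--                 break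
--     return time_lapse
-- ===== SOURCE B (Python) =====
-- def solution(bridge_length, weight, truck_weights):
--     # One upward scan with a running sum per group start: picks the largest group
--     # size whose total weight fits, then jumps past the whole group.
--     time_lapse = 1
--     rest = truck_weights
--     while rest:
--         s = 0
--         best = 0
--         for j, w in enumerate(rest[:max(bridge_length, 0)], 1):
--             s += w
--             if s <= weight:
--                 best = j
--         if best:
--             time_lapse += bridge_length + best - 1
--             rest = rest[best:]
--         else:
--             rest = rest[1:]
--     return time_lapse
-- ===== Notes on version B (the rewrite author's own statement) =====
-- stated objective: faster
-- what changed: Instead of A's descending scan over candidate group sizes that re-slices and re-sums the list for every candidate (O(L) work per candidate, O(L^2) per group start), B makes one ascending pass per group start with a running sum, keeping the largest fitting size, and walks the remaining-trucks suffix directly.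
import Mathlib
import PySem

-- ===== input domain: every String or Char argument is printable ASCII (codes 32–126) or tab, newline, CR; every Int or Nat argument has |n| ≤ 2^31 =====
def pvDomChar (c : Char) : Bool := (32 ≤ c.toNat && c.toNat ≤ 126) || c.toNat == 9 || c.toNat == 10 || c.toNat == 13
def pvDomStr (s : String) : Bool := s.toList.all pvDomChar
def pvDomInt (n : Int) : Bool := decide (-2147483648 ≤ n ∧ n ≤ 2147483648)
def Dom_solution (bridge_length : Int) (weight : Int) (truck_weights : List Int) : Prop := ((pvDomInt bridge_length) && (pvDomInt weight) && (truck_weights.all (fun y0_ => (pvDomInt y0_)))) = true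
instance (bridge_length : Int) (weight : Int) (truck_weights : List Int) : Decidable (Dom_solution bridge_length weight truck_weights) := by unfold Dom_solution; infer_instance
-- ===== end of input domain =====

-- B replaces A's repeated O(j) slice sums per candidate group size by one upward scan
-- with a running sum per group start (objective: faster; see claim).

-- ===== PORT A =====
-- inner `for j in range(min(bridge_length, n-i), 0, -1)` with break on first fit
def innerA (weight bridge_length : Int) (tws : List Int) (i : Int) :
    List Int → Int × Int → Int × Int
  | [], st => st
  | j :: rest, (tl, off) =>
      let sl := PySem.List.slice tws (some i) (some (i + j))
      let s := sl.sum
      let l : Int := sl.length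
      if s ≤ weight ∧ l ≤ bridge_length then (tl + (bridge_length + l - 1), off + (j - 1))
      else innerA weight bridge_length tws i rest (tl, off)

-- outer `for i in range(n_trucks)` with `i += offset` and `break` once i ≥ n_trucks
def outerA (bridge_length weight : Int) (tws : List Int) (n : Int) :
    List Int → Int × Int → Int
  | [], (tl, _) => tl
  | i0 :: rest, (tl, off) =>
      let i := i0 + off
      if n ≤ i then tl
      else
        let st := innerA weight bridge_length tws i
          (PySem.List.pyRange (min bridge_length (n - i)) 0 (-1)) (tl, off)
        outerA bridge_length weight tws n rest st

def solution (bridge_length : Int) (weight : Int) (truck_weights : List Int) : Int :=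
  outerA bridge_length weight truck_weights (truck_weights.length : Int)
    (PySem.List.pyRange 0 (truck_weights.length : Int) 1) (1, 0)

-- ===== PORT B =====
-- `for j, w in enumerate(rest[:max(bridge_length,0)], 1): s += w; if s <= weight: best = j`
def bestGo (weight : Int) : List Int → Int → Nat → Nat → Nat
  | [], _, best, _ => best
  | w :: t, s, best, j =>
      let s' := s + w
      bestGo weight t s' (if s' ≤ weight then j else best) (j + 1)

-- the `while rest:` loop of Source B
def loopB (bridge_length weight : Int) (rest : List Int) (tl : Int) : Int :=
  match rest with
  | [] => tl
  | a :: r =>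
      let pre := PySem.List.slice (a :: r) none (some (max bridge_length 0))
      let best := bestGo weight pre 0 0 1
      if h : best ≠ 0 then
        loopB bridge_length weight ((a :: r).drop best) (tl + (bridge_length + (best : Int) - 1))
      else
        loopB bridge_length weight r tl
termination_by rest.length
decreasing_by
  · simp only [List.length_drop, List.length_cons]
    have h' : bestGo weight (PySem.List.slice (a :: r) none (some (max bridge_length 0))) 0 0 1 ≠ 0 := h
    omega
  · simp

def solution_alt (bridge_length : Int) (weight : Int) (truck_weights : List Int) : Int :=
  loopB bridge_length weight truck_weights 1

-- ===== PRECONDITION & SPEC =====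
def Spec_solution (bridge_length : Int) (weight : Int) (truck_weights : List Int) (out : Int) : Prop := out = solution_alt bridge_length weight truck_weights
instance (bridge_length : Int) (weight : Int) (truck_weights : List Int) (out : Int) : Decidable (Spec_solution bridge_length weight truck_weights out) := by unfold Spec_solution; infer_instance

-- ===== CLAIM (what is proved, stated in full; the proofs are below) =====
def Claim_equal_solution : Prop := ∀ (bridge_length : Int) (weight : Int) (truck_weights : List Int), Dom_solution bridge_length weight truck_weights → Spec_solution bridge_length weight truck_weights (solution bridge_length weight truck_weights)

-- ===== LEMMAS AND PROOFS =====

-- reference: largest k ≤ m with sum of the first k elements of c ≤ weight, else 0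
def refFind (weight : Int) (c : List Int) : Nat → Nat
  | 0 => 0
  | k + 1 => if (c.take (k + 1)).sum ≤ weight then k + 1 else refFind weight c k

theorem refFind_le (weight : Int) (c : List Int) (m : Nat) : refFind weight c m ≤ m := by
  induction m with
  | zero => simp [refFind]
  | succ k ih => simp only [refFind]; split <;> omega

theorem refFind_take (weight : Int) (c : List Int) (K : Nat) :
    ∀ m, m ≤ K → refFind weight (c.take K) m = refFind weight c m := by
  intro m
  induction m with
  | zero => intro _; simp [refFind]
  | succ k ih =>
      intro h
      simp only [refFind, List.take_take, Nat.min_eq_left h, ih (by omega)]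

theorem bestGo_eq_refFind_aux (weight : Int) :
    ∀ (t front : List Int),
      bestGo weight t front.sum (refFind weight (front ++ t) front.length) (front.length + 1)
        = refFind weight (front ++ t) (front.length + t.length) := by
  intro t
  induction t with
  | nil => intro front; simp [bestGo]
  | cons w t' ih =>
      intro front
      have hassoc : front ++ w :: t' = (front ++ [w]) ++ t' := by simp
      have hsum : (front ++ [w]).sum = front.sum + w := by simp
      have hlen : (front ++ [w]).length = front.length + 1 := by simp
      have hstep : (if front.sum + w ≤ weight then front.length + 1
                    else refFind weight (front ++ w :: t') front.length)
          = refFind weight ((front ++ [w]) ++ t') (front ++ [w]).length := by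
        rw [hlen]
        simp only [refFind]
        have htake : (((front ++ [w]) ++ t').take (front.length + 1)).sum = front.sum + w := by
          have h2 : ((front ++ [w]) ++ t').take (front ++ [w]).length = front ++ [w] :=
            List.take_left
          rw [hlen] at h2
          rw [h2]; simp
        rw [htake, ← hassoc]
      simp only [bestGo]
      rw [hstep, ← hsum, ← hlen]
      have h3 := ih (front ++ [w])
      rw [hassoc, show front.length + (w :: t').length = (front ++ [w]).length + t'.length from by
        simp; omega]
      exact h3

theorem bestGo_eq_refFind (weight : Int) (pre : List Int) :
    bestGo weight pre 0 0 1 = refFind weight pre pre.length := by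
  have := bestGo_eq_refFind_aux weight pre []
  simpa [refFind] using this

theorem innerA_eq (weight bridge_length : Int) (tws : List Int) (pos : Nat)
    (hpos : pos ≤ tws.length) :
    ∀ (m : Nat), (0 < m → (m : Int) ≤ min bridge_length ((tws.length : Int) - pos)) →
    ∀ (tl off : Int),
      innerA weight bridge_length tws (pos : Int) (PySem.List.pyRange (m : Int) 0 (-1)) (tl, off)
        = (if refFind weight (tws.drop pos) m = 0 then (tl, off)
           else (tl + (bridge_length + (refFind weight (tws.drop pos) m : Int) - 1),
                 off + ((refFind weight (tws.drop pos) m : Int) - 1))) := by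
  intro m
  induction m with
  | zero =>
      intro _ tl off
      rw [PySem.List.pyRange_neg_one_eq_nil (by norm_num)]
      simp [innerA, refFind]
  | succ k ih =>
      intro hm tl off
      have hm' := hm (by omega)
      have hble : ((k + 1 : Nat) : Int) ≤ bridge_length := le_trans hm' (min_le_left _ _)
      have hlen : ((k + 1 : Nat) : Int) ≤ (tws.length : Int) - pos :=
        le_trans hm' (min_le_right _ _)
      have hlenN : k + 1 ≤ tws.length - pos := by omega
      rw [PySem.List.pyRange_neg_one_cons (by push_cast; omega)]
      simp only [innerA]
      have hsl : PySem.List.slice tws (some (pos : Int)) (some ((pos : Int) + ((k + 1 : Nat) : Int)))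
          = (tws.drop pos).take (k + 1) := PySem.List.slice_natCast_add tws pos (k + 1)
      have hl : ((tws.drop pos).take (k + 1)).length = k + 1 := by
        simp [List.length_take, List.length_drop]; omega
      by_cases hs : ((tws.drop pos).take (k + 1)).sum ≤ weight
      · rw [hsl, if_pos ⟨hs, by rw [hl]; exact hble⟩]
        have hr : refFind weight (tws.drop pos) (k + 1) = k + 1 := by
          simp [refFind, hs]
        rw [hr, hl]
        simp
      · rw [hsl, if_neg (by rw [hl]; exact fun hc => hs hc.1)]
        have hr : refFind weight (tws.drop pos) (k + 1) = refFind weight (tws.drop pos) k := by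
          simp [refFind, hs]
        rw [hr, show ((k + 1 : Nat) : Int) - 1 = ((k : Nat) : Int) by push_cast; ring]
        exact ih (fun _ => le_trans (by push_cast; omega) hm') tl off

theorem outer_eq (bridge_length weight : Int) (tws : List Int) :
    ∀ (m t pos : Nat) (tl : Int), t + m = tws.length → t ≤ pos → pos ≤ tws.length →
      outerA bridge_length weight tws (tws.length : Int)
          (PySem.List.pyRange (t : Int) (tws.length : Int) 1) (tl, (pos : Int) - (t : Int))
        = loopB bridge_length weight (tws.drop pos) tl := by
  intro m
  induction m with
  | zero =>
      intro t pos tl h1 h2 h3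
      rw [PySem.List.pyRange_one_eq_nil (by omega)]
      have hpt : pos = tws.length := by omega
      rw [hpt, List.drop_length]
      simp [outerA, loopB]
  | succ k ih =>
      intro t pos tl h1 h2 h3
      rw [PySem.List.pyRange_one_cons (by exact_mod_cast by omega)]
      simp only [outerA]
      have hi : ((t : Int) + ((pos : Int) - (t : Int))) = (pos : Int) := by ring
      rw [hi]
      by_cases hpn : pos = tws.length
      · rw [if_pos (by rw [hpn]), hpn, List.drop_length]
        simp [loopB]
      · have hplt : pos < tws.length := by omega
        rw [if_neg (by omega)]
        -- rewrite the inner range bound as a natural number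
        have hLN : PySem.List.pyRange (min bridge_length ((tws.length : Int) - (pos : Int))) 0 (-1)
            = PySem.List.pyRange (((min bridge_length ((tws.length : Int) - (pos : Int))).toNat : Nat) : Int) 0 (-1) := by
          by_cases h : (min bridge_length ((tws.length : Int) - (pos : Int))) ≤ 0
          · rw [PySem.List.pyRange_neg_one_eq_nil h, PySem.List.pyRange_neg_one_eq_nil (by omega)]
          · congr 1; omega
        set m' : Nat := (min bridge_length ((tws.length : Int) - (pos : Int))).toNat with hm'def
        have hm'bound : 0 < m' → (m' : Int) ≤ min bridge_length ((tws.length : Int) - pos) := by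
          intro h
          have : ((m' : Nat) : Int) = min bridge_length ((tws.length : Int) - pos) := by
            rw [hm'def]; omega
          omega
        rw [hLN, innerA_eq weight bridge_length tws pos (by omega) m' hm'bound tl
          ((pos : Int) - (t : Int))]
        -- B side
        obtain ⟨a, r', hdrop⟩ : ∃ a r', tws.drop pos = a :: r' := by
          rcases hE : tws.drop pos with _ | ⟨a, r'⟩
          · exfalso; have := List.drop_eq_nil_iff.mp hE; omega
          · exact ⟨a, r', rfl⟩
        have hr'len : r'.length + 1 = tws.length - pos := by
          have := congrArg List.length hdrop
          simp [List.length_drop] at this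
          omega
        rw [hdrop, loopB]
        have hpre : PySem.List.slice (a :: r') none (some (max bridge_length 0))
            = (a :: r').take bridge_length.toNat := by
          rw [PySem.List.slice_to (a :: r') (le_max_right _ _)]
          congr 1; omega
        have hprelen : ((a :: r').take bridge_length.toNat).length = m' := by
          simp [List.length_take]
          omega
        have hbest : bestGo weight (PySem.List.slice (a :: r') none (some (max bridge_length 0))) 0 0 1
            = refFind weight (a :: r') m' := by
          rw [hpre, bestGo_eq_refFind, hprelen, refFind_take weight (a :: r') bridge_length.toNat m' (by omega)]
        by_cases hz : refFind weight (a :: r') m' = 0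
        · rw [if_pos hz]
          simp only [hbest, hz]
          have hrec : ((pos : Int) - (t : Int)) = (((pos + 1 : Nat) : Int) - ((t + 1 : Nat) : Int)) := by
            push_cast; ring
          rw [hrec, show ((t : Int) + 1) = ((t + 1 : Nat) : Int) by push_cast; ring]
          rw [ih (t + 1) (pos + 1) tl (by omega) (by omega) (by omega)]
          have : tws.drop (pos + 1) = r' := by
            have := congrArg List.tail hdrop
            simpa [List.tail_drop] using this
          rw [this]
          simp
        · rw [if_neg hz]
          set r := refFind weight (a :: r') m' with hrdef
          have hrle : r ≤ m' := refFind_le weight (a :: r') m'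
          have hm'le : m' ≤ tws.length - pos := by omega
          simp only [hbest, dif_pos (by simpa using hz)]
          have hoff : ((pos : Int) - (t : Int)) + ((r : Int) - 1)
              = (((pos + r : Nat) : Int) - ((t + 1 : Nat) : Int)) := by push_cast; ring
          rw [hoff, show ((t : Int) + 1) = ((t + 1 : Nat) : Int) by push_cast; ring]
          have hdd : (a :: r').drop r = tws.drop (pos + r) := by
            rw [← hdrop, List.drop_drop]
          rw [ih (t + 1) (pos + r) (tl + (bridge_length + (r : Int) - 1)) (by omega) (by omega) (by omega), ← hdd]

-- ===== VERDICT (by name: the statement is the Claim_ definition above) =====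
theorem solution_spec : Claim_equal_solution := by
  intro bl w tws _
  unfold Spec_solution solution solution_alt
  have := outer_eq bl w tws tws.length 0 0 1 (by omega) (by omega) (by omega)
  simpa using this
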